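-- pv_equiv track=rewrite | github.com/915dbfl/youlAlgorithm | python/zip/dp/에어컨⭐️.py | solution
-- ===== SOURCE A (Python) =====
-- def solution(temperature, t1, t2, a, b, onboard):
--     max_walt = 1000 * 100
--     t1 += 10
--     t2 += 10
--     temperature += 10
--
--     # DP[i][j] : i분에 j 온도를 만들 수 있는 가장 적은 전력
--     dp = [[max_walt] * 51 for _ in range(len(onboard))]
--     dp[0][temperature] = 0
--
--     # 에어컨 온도 방향
--     temp_diff = -1 if temperature > t2 else 1
--
--     for i in range(1, len(onboard)):
--         for j in range(51):
--             if (onboard[i] == 1 and t1 <= j <= t2) or onboard[i] == 0: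
--                 # 에어컨 x, 실내 != 실외
--                 if 0 <= j+temp_diff <= 50 :
--                     dp[i][j] = min(dp[i][j], dp[i-1][j+temp_diff])
--                 # 에어컨 x, 실내 == 실외
--                 if j == temperature:
--                     dp[i][j] = min(dp[i][j], dp[i-1][j])
--                 # 에어컨 o, 온도 변화 o
--                 if 0 <= j-temp_diff <= 50:
--                     dp[i][j] = min(dp[i][j], dp[i-1][j-temp_diff] + a)
--                 # 에어컨 o, 온도 변화 x(희망 == 현재 온도)
--                 if t1 <= j <= t2:
--                     dp[i][j] = min(dp[i][j], dp[i-1][j] + b)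
--
--     answer = min(dp[len(onboard)-1])
--     return answer
-- ===== SOURCE B (Python) =====
-- def solution(temperature, t1, t2, a, b, onboard):
--     MAX = 1000 * 100
--     lo, hi, out = t1 + 10, t2 + 10, temperature + 10
--     drift = -1 if out > hi else 1
--
--     def row(i):
--         if i == 0:
--             return [0 if j == out else MAX for j in range(51)]
--         prev = row(i - 1)
--         flag = onboard[i]
--         cur = []
--         for j in range(51):
--             if flag == 0 or (flag == 1 and lo <= j <= hi):
--                 cands = [MAX]
--                 if 0 <= j + drift <= 50:
--                     cands.append(prev[j + drift])
--                 if j == out: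
--                     cands.append(prev[j])
--                 if 0 <= j - drift <= 50:
--                     cands.append(prev[j - drift] + a)
--                 if lo <= j <= hi:
--                     cands.append(prev[j] + b)
--                 cur.append(min(cands))
--             else:
--                 cur.append(MAX)
--         return cur
--
--     return min(row(len(onboard) - 1))
-- ===== Notes on version B (the rewrite author's own statement) =====
-- stated objective: alternative
-- what changed: A fills a mutable 51-column 2D table with a nested loop of in-place guarded min-assignments; B is a top-down recursion over minutes that builds each row as a pure list of min-over-candidate-list cells (no table, no mutation).
-- outside the precondition, e.g. on solution(-20, 0, 10, 1, 1, [1, 0]): A returns 0, B returns 100000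
import Mathlib
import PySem

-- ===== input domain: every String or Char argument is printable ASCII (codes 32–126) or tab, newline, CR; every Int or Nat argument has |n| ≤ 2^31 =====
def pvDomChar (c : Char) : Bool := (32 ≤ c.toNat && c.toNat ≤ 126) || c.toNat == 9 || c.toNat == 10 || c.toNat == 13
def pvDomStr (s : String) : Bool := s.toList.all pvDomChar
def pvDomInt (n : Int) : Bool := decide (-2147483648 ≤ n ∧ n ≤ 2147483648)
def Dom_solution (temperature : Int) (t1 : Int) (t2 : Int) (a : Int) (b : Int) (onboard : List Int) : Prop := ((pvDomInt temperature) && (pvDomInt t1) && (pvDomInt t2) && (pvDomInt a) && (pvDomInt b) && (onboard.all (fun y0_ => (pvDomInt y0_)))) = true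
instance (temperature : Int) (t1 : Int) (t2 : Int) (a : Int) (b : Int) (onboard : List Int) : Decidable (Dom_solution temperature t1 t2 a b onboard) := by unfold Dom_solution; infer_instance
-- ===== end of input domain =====

-- B replaces A's mutable 2D DP table (double loop with in-place guarded min-assignments) by a
-- top-down recursion over minutes that builds each row as pure min-of-candidate-list cells;
-- return values agree on Pre_ (objective: alternative decomposition, same asymptotic cost).

-- ===== PORT A =====
-- inner `for j in range(51)` loop of A, mutating the table row dp[i] in place
-- (pyGetD/pySetD defaults are never used: every index is in range by the loop's own guards)
def pvA_inner (t1 t2 temperature temp_diff a b : Int) (onboard : List Int) (i : Int)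
    (dp : List (List Int)) : List (List Int) :=
  (PySem.List.pyRange 0 51 1).foldl (fun dp j =>
    if (PySem.List.pyGetD onboard i 0 = 1 ∧ t1 ≤ j ∧ j ≤ t2) ∨ PySem.List.pyGetD onboard i 0 = 0 then
      let dp := if 0 ≤ j + temp_diff ∧ j + temp_diff ≤ 50 then
          PySem.List.pySetD dp i (PySem.List.pySetD (PySem.List.pyGetD dp i []) j
            (min (PySem.List.pyGetD (PySem.List.pyGetD dp i []) j 0)
                 (PySem.List.pyGetD (PySem.List.pyGetD dp (i-1) []) (j + temp_diff) 0)))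
        else dp
      let dp := if j = temperature then
          PySem.List.pySetD dp i (PySem.List.pySetD (PySem.List.pyGetD dp i []) j
            (min (PySem.List.pyGetD (PySem.List.pyGetD dp i []) j 0)
                 (PySem.List.pyGetD (PySem.List.pyGetD dp (i-1) []) j 0)))
        else dp
      let dp := if 0 ≤ j - temp_diff ∧ j - temp_diff ≤ 50 then
          PySem.List.pySetD dp i (PySem.List.pySetD (PySem.List.pyGetD dp i []) j
            (min (PySem.List.pyGetD (PySem.List.pyGetD dp i []) j 0)
                 (PySem.List.pyGetD (PySem.List.pyGetD dp (i-1) []) (j - temp_diff) 0 + a)))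
        else dp
      let dp := if t1 ≤ j ∧ j ≤ t2 then
          PySem.List.pySetD dp i (PySem.List.pySetD (PySem.List.pyGetD dp i []) j
            (min (PySem.List.pyGetD (PySem.List.pyGetD dp i []) j 0)
                 (PySem.List.pyGetD (PySem.List.pyGetD dp (i-1) []) j 0 + b)))
        else dp
      dp
    else dp) dp

-- `dp[0][temperature] = 0` is ported as an in-range assignment: Pre_ guarantees
-- 0 ≤ temperature+10 ≤ 50 (outside it Python raises IndexError or wraps a negative index)
def solution (temperature : Int) (t1 : Int) (t2 : Int) (a : Int) (b : Int) (onboard : List Int) : Int :=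
  let max_walt : Int := 1000 * 100
  let t1 := t1 + 10
  let t2 := t2 + 10
  let temperature := temperature + 10
  let dp : List (List Int) := List.replicate onboard.length (List.replicate 51 max_walt)
  let dp := PySem.List.pySetD dp 0 (PySem.List.pySetD (PySem.List.pyGetD dp 0 []) temperature 0)
  let temp_diff : Int := if temperature > t2 then -1 else 1
  let dp := (PySem.List.pyRange 1 (onboard.length : Int) 1).foldl
      (fun dp i => pvA_inner t1 t2 temperature temp_diff a b onboard i dp) dp
  (PySem.List.min? (PySem.List.pyGetD dp ((onboard.length : Int) - 1) []) (fun y => y)).getD 0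

-- ===== PORT B =====
-- one cell of Source B's row: min over the guarded candidate list
def pvB_cell (M lo hi out drift a b flag : Int) (prev : List Int) (j : Int) : Int :=
  if flag = 0 ∨ (flag = 1 ∧ lo ≤ j ∧ j ≤ hi) then
    let cands : List Int := [M]
    let cands := if 0 ≤ j + drift ∧ j + drift ≤ 50 then cands ++ [PySem.List.pyGetD prev (j + drift) 0] else cands
    let cands := if j = out then cands ++ [PySem.List.pyGetD prev j 0] else cands
    let cands := if 0 ≤ j - drift ∧ j - drift ≤ 50 then cands ++ [PySem.List.pyGetD prev (j - drift) 0 + a] else cands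
    let cands := if lo ≤ j ∧ j ≤ hi then cands ++ [PySem.List.pyGetD prev j 0 + b] else cands
    (PySem.List.min? cands (fun y => y)).getD 0
  else M

-- Source B's recursive `row(i)` (its per-j append loop is the map over range(51))
def pvB_row (M lo hi out drift a b : Int) (onboard : List Int) : Nat → List Int
  | 0 => (PySem.List.pyRange 0 51 1).map (fun j => if j = out then 0 else M)
  | i + 1 =>
    let prev := pvB_row M lo hi out drift a b onboard i
    let flag := PySem.List.pyGetD onboard ((i : Int) + 1) 0
    (PySem.List.pyRange 0 51 1).map (pvB_cell M lo hi out drift a b flag prev)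

def solution_alt (temperature : Int) (t1 : Int) (t2 : Int) (a : Int) (b : Int) (onboard : List Int) : Int :=
  let M : Int := 1000 * 100
  let lo := t1 + 10
  let hi := t2 + 10
  let out := temperature + 10
  let drift : Int := if out > hi then -1 else 1
  (PySem.List.min? (pvB_row M lo hi out drift a b onboard (onboard.length - 1)) (fun y => y)).getD 0

-- ===== PRECONDITION & SPEC =====
-- Pre_ restricts to the problem's natural domain: a nonempty minutes list and an outdoor
-- temperature with 0 ≤ temperature+10 ≤ 50 (the 51 DP slots). Outside it A raises IndexError,
-- except for -61 ≤ temperature ≤ -11 where A still returns a value only because Python's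
-- negative-index wraparound seeds dp[0] at an accidental slot; those inputs are excluded too.
def Pre_solution (temperature : Int) (t1 : Int) (t2 : Int) (a : Int) (b : Int) (onboard : List Int) : Prop :=
  onboard ≠ [] ∧ 0 ≤ temperature + 10 ∧ temperature + 10 ≤ 50
instance (temperature : Int) (t1 : Int) (t2 : Int) (a : Int) (b : Int) (onboard : List Int) : Decidable (Pre_solution temperature t1 t2 a b onboard) := by unfold Pre_solution; infer_instance

def pvWitness_solution : Int × Int × Int × Int × Int × List Int := (0, 0, 10, 5, 1, [1, 0, 1])

def Spec_solution (temperature : Int) (t1 : Int) (t2 : Int) (a : Int) (b : Int) (onboard : List Int) (out : Int) : Prop := out = solution_alt temperature t1 t2 a b onboard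
instance (temperature : Int) (t1 : Int) (t2 : Int) (a : Int) (b : Int) (onboard : List Int) (out : Int) : Decidable (Spec_solution temperature t1 t2 a b onboard out) := by unfold Spec_solution; infer_instance

-- ===== CLAIM (what is proved, stated in full; the proofs are below) =====
def Claim_equal_solution : Prop := ∀ (temperature : Int) (t1 : Int) (t2 : Int) (a : Int) (b : Int) (onboard : List Int), Dom_solution temperature t1 t2 a b onboard → Pre_solution temperature t1 t2 a b onboard → Spec_solution temperature t1 t2 a b onboard (solution temperature t1 t2 a b onboard)

-- ===== LEMMAS AND PROOFS =====

-- A's per-cell value, written at row level (the min-assignment chain of the inner loop body)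
def pvCellA (t1 t2 temperature temp_diff a b flag : Int) (prev : List Int) (j : Int) : Int :=
  if (flag = 1 ∧ t1 ≤ j ∧ j ≤ t2) ∨ flag = 0 then
    let v : Int := 1000 * 100
    let v := if 0 ≤ j + temp_diff ∧ j + temp_diff ≤ 50 then min v (PySem.List.pyGetD prev (j + temp_diff) 0) else v
    let v := if j = temperature then min v (PySem.List.pyGetD prev j 0) else v
    let v := if 0 ≤ j - temp_diff ∧ j - temp_diff ≤ 50 then min v (PySem.List.pyGetD prev (j - temp_diff) 0 + a) else v
    let v := if t1 ≤ j ∧ j ≤ t2 then min v (PySem.List.pyGetD prev j 0 + b) else v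
    v
  else 1000 * 100

-- A's cell equals B's cell
lemma pvCellA_eq_pvB_cell (t1 t2 temperature temp_diff a b flag : Int) (prev : List Int) (j : Int) :
    pvCellA t1 t2 temperature temp_diff a b flag prev j
      = pvB_cell (1000 * 100) t1 t2 temperature temp_diff a b flag prev j := by
  unfold pvCellA pvB_cell
  by_cases hc : (flag = 1 ∧ t1 ≤ j ∧ j ≤ t2) ∨ flag = 0
  · rw [if_pos hc, if_pos (by tauto)]
    split_ifs <;> simp [PySem.List.min?_id_cons, List.foldl, min_assoc]
  · rw [if_neg hc, if_neg (by tauto)]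

-- A's inner loop body at one j, expressed on the row dp[i]
def pvRowStep (t1 t2 temperature temp_diff a b flag : Int) (prev row : List Int) (j : Int) : List Int :=
  if (flag = 1 ∧ t1 ≤ j ∧ j ≤ t2) ∨ flag = 0 then
    let row := if 0 ≤ j + temp_diff ∧ j + temp_diff ≤ 50 then
        PySem.List.pySetD row j (min (PySem.List.pyGetD row j 0) (PySem.List.pyGetD prev (j + temp_diff) 0)) else row
    let row := if j = temperature then
        PySem.List.pySetD row j (min (PySem.List.pyGetD row j 0) (PySem.List.pyGetD prev j 0)) else row
    let row := if 0 ≤ j - temp_diff ∧ j - temp_diff ≤ 50 then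
        PySem.List.pySetD row j (min (PySem.List.pyGetD row j 0) (PySem.List.pyGetD prev (j - temp_diff) 0 + a)) else row
    let row := if t1 ≤ j ∧ j ≤ t2 then
        PySem.List.pySetD row j (min (PySem.List.pyGetD row j 0) (PySem.List.pyGetD prev j 0 + b)) else row
    row
  else row

-- the inner loop only touches dp[i]: it is pySetD of a row-level fold
lemma pvA_inner_eq_row (t1 t2 temperature temp_diff a b : Int) (onboard : List Int)
    (k : Nat) (dp : List (List Int)) (hk1 : 1 ≤ k) (hk2 : k < dp.length) :
    pvA_inner t1 t2 temperature temp_diff a b onboard (k : Int) dp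
      = PySem.List.pySetD dp (k : Int)
          ((PySem.List.pyRange 0 51 1).foldl
            (pvRowStep t1 t2 temperature temp_diff a b (PySem.List.pyGetD onboard (k : Int) 0)
              (PySem.List.pyGetD dp ((k : Int) - 1) []))
            (PySem.List.pyGetD dp (k : Int) [])) := by
  unfold pvA_inner
  generalize PySem.List.pyRange 0 51 1 = js
  induction js generalizing dp with
  | nil =>
    simp only [List.foldl_nil]
    rw [PySem.List.pyGetD_natCast, List.getD_eq_getElem _ _ hk2]
    simp [List.set_getElem_self]
  | cons j js ih =>
    have hgetk : PySem.List.pyGetD dp (k : Int) [] = dp[k] := by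
      rw [PySem.List.pyGetD_natCast, List.getD_eq_getElem _ _ hk2]
    have hsetset : ∀ r r' : List Int,
        PySem.List.pySetD (PySem.List.pySetD dp (k : Int) r) (k : Int) r'
          = PySem.List.pySetD dp (k : Int) r' := by
      simp [List.set_set]
    have hgetset : ∀ r : List Int,
        PySem.List.pyGetD (PySem.List.pySetD dp (k : Int) r) (k : Int) [] = r := by
      intro r
      rw [PySem.List.pyGetD_pySetD_natCast _ _ _ _ _ hk2]
      simp
    have hc1 : ((k : Int) - 1) = ((k - 1 : Nat) : Int) := by omega
    have hprevset : ∀ r : List Int,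
        PySem.List.pyGetD (PySem.List.pySetD dp (k : Int) r) ((k : Int) - 1) []
          = PySem.List.pyGetD dp ((k : Int) - 1) [] := by
      intro r
      rw [hc1, PySem.List.pyGetD_pySetD_natCast _ _ _ _ _ hk2]
      have : ¬ (k - 1 = k) := by omega
      simp [this]
    have hlen : ∀ r : List Int, k < (PySem.List.pySetD dp (k : Int) r).length := by
      intro r; simpa using hk2
    have hstep :
        (if (PySem.List.pyGetD onboard (k : Int) 0 = 1 ∧ t1 ≤ j ∧ j ≤ t2) ∨ PySem.List.pyGetD onboard (k : Int) 0 = 0 then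
          let dp' := if 0 ≤ j + temp_diff ∧ j + temp_diff ≤ 50 then
              PySem.List.pySetD dp (k : Int) (PySem.List.pySetD (PySem.List.pyGetD dp (k : Int) []) j
                (min (PySem.List.pyGetD (PySem.List.pyGetD dp (k : Int) []) j 0)
                     (PySem.List.pyGetD (PySem.List.pyGetD dp ((k : Int)-1) []) (j + temp_diff) 0)))
            else dp
          let dp' := if j = temperature then
              PySem.List.pySetD dp' (k : Int) (PySem.List.pySetD (PySem.List.pyGetD dp' (k : Int) []) j
                (min (PySem.List.pyGetD (PySem.List.pyGetD dp' (k : Int) []) j 0)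
                     (PySem.List.pyGetD (PySem.List.pyGetD dp' ((k : Int)-1) []) j 0)))
            else dp'
          let dp' := if 0 ≤ j - temp_diff ∧ j - temp_diff ≤ 50 then
              PySem.List.pySetD dp' (k : Int) (PySem.List.pySetD (PySem.List.pyGetD dp' (k : Int) []) j
                (min (PySem.List.pyGetD (PySem.List.pyGetD dp' (k : Int) []) j 0)
                     (PySem.List.pyGetD (PySem.List.pyGetD dp' ((k : Int)-1) []) (j - temp_diff) 0 + a)))
            else dp'
          let dp' := if t1 ≤ j ∧ j ≤ t2 then
              PySem.List.pySetD dp' (k : Int) (PySem.List.pySetD (PySem.List.pyGetD dp' (k : Int) []) j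
                (min (PySem.List.pyGetD (PySem.List.pyGetD dp' (k : Int) []) j 0)
                     (PySem.List.pyGetD (PySem.List.pyGetD dp' ((k : Int)-1) []) j 0 + b)))
            else dp'
          dp'
        else dp)
        = PySem.List.pySetD dp (k : Int)
            (pvRowStep t1 t2 temperature temp_diff a b (PySem.List.pyGetD onboard (k : Int) 0)
              (PySem.List.pyGetD dp ((k : Int) - 1) []) (PySem.List.pyGetD dp (k : Int) []) j) := by
      unfold pvRowStep
      by_cases hcond : (PySem.List.pyGetD onboard (k : Int) 0 = 1 ∧ t1 ≤ j ∧ j ≤ t2) ∨ PySem.List.pyGetD onboard (k : Int) 0 = 0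
      · rw [if_pos hcond, if_pos hcond]
        split_ifs
        all_goals try (rw [hgetk, PySem.List.pySetD_natCast]; exact (List.set_getElem_self hk2).symm)
        all_goals simp only [hsetset, hgetset, hprevset]
      · rw [if_neg hcond, if_neg hcond, hgetk, PySem.List.pySetD_natCast]
        exact (List.set_getElem_self hk2).symm
    rw [List.foldl_cons, List.foldl_cons, hstep]
    rw [ih _ (hlen _)]
    rw [hgetset, hsetset, hprevset]

-- one inner-loop step at in-range j with dp[i][j] still blank is a set of the cell value
lemma pvRowStep_set (t1 t2 temperature temp_diff a b flag : Int) (prev row : List Int) (s : Nat)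
    (hlen : row.length = 51) (hs : s < 51) (hM : row.getD s 0 = 1000 * 100) :
    pvRowStep t1 t2 temperature temp_diff a b flag prev row (s : Int)
      = row.set s (pvCellA t1 t2 temperature temp_diff a b flag prev (s : Int)) := by
  have hsl : s < row.length := by omega
  have hget : row[s] = (1000 * 100 : Int) := by
    have := List.getD_eq_getElem row 0 hsl
    omega
  have hv : ∀ v : Int, (row.set s v).getD s 0 = v := by
    intro v
    rw [List.getD_eq_getElem _ _ (by simpa using hsl)]
    simp [List.getElem_set]
  unfold pvRowStep pvCellA
  by_cases hc : (flag = 1 ∧ t1 ≤ (s : Int) ∧ (s : Int) ≤ t2) ∨ flag = 0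
  · rw [if_pos hc, if_pos hc]
    split_ifs
    all_goals simp [PySem.List.pySetD_of_nonneg, PySem.List.pyGetD_natCast, hv,
        List.set_set, hsl, hget, List.getD_eq_getElem, hM]
    all_goals (have hx : row[s] = (100000 : Int) := by omega
               rw [← hx, List.set_getElem_self])
  · rw [if_neg hc, if_neg hc]
    rw [show (1000 * 100 : Int) = row[s] from hget.symm, List.set_getElem_self]

-- the row-level fold from position s over still-blank suffix entries maps each cell
lemma pvRowFold_gen (t1 t2 temperature temp_diff a b flag : Int) (prev : List Int) :
    ∀ (c s : Nat), c + s = 51 → ∀ (row : List Int), row.length = 51 →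
      (∀ k, s ≤ k → k < 51 → row.getD k 0 = 1000 * 100) →
      (PySem.List.pyRange (s : Int) 51 1).foldl
          (pvRowStep t1 t2 temperature temp_diff a b flag prev) row
        = row.take s
            ++ (PySem.List.pyRange (s : Int) 51 1).map
                 (pvCellA t1 t2 temperature temp_diff a b flag prev) := by
  intro c
  induction c with
  | zero =>
    intro s hcs row hlen hM
    have h51 : s = 51 := by omega
    subst h51
    rw [PySem.List.pyRange_one_eq_nil (by norm_num)]
    simp [List.take_of_length_le, hlen]
  | succ c ih =>
    intro s hcs row hlen hM
    have hs51 : s < 51 := by omega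
    have hcons : PySem.List.pyRange (s : Int) 51 1
        = (s : Int) :: PySem.List.pyRange ((s : Int) + 1) 51 1 :=
      PySem.List.pyRange_one_cons (by exact_mod_cast hs51)
    rw [hcons, List.foldl_cons, List.map_cons]
    rw [pvRowStep_set t1 t2 temperature temp_diff a b flag prev row s hlen hs51 (hM s le_rfl hs51)]
    have hcast : ((s : Int) + 1) = ((s + 1 : Nat) : Int) := by push_cast; ring
    have hsl : s < row.length := by omega
    rw [hcast, ih (s + 1) (by omega) _ (by simp [hlen]) ?_]
    · have h1 : (row.set s (pvCellA t1 t2 temperature temp_diff a b flag prev (s : Int))).take (s + 1)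
          = row.take s ++ [pvCellA t1 t2 temperature temp_diff a b flag prev (s : Int)] := by
        apply List.ext_getElem
        · simp [hlen]; omega
        · intro i hi1 hi2
          have hi : i < s + 1 := by simp [hlen] at hi1; omega
          by_cases his : i = s
          · subst his
            simp [List.getElem_take, List.getElem_set, List.getElem_append, hlen]
          · have hisl : i < s := by omega
            simp [List.getElem_take, List.getElem_set, List.getElem_append, his,
              Ne.symm his, hisl]
            intro h
            omega
      rw [h1, List.append_assoc]
      rfl
    · intro k hk1 hk2
      have hkl : k < row.length := by omega
      rw [List.getD_eq_getElem _ _ (by simpa [hlen] using hk2)]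
      rw [List.getElem_set]
      rw [if_neg (by omega)]
      have := hM k (by omega) hk2
      rw [List.getD_eq_getElem _ _ hkl] at this
      exact this

-- the row-level fold over a blank row is the map of cells
lemma pvRowFold_eq_map (t1 t2 temperature temp_diff a b flag : Int) (prev : List Int) :
    (PySem.List.pyRange 0 51 1).foldl
        (pvRowStep t1 t2 temperature temp_diff a b flag prev) (List.replicate 51 (1000 * 100))
      = (PySem.List.pyRange 0 51 1).map (pvCellA t1 t2 temperature temp_diff a b flag prev) := by
  have := pvRowFold_gen t1 t2 temperature temp_diff a b flag prev 51 0 (by omega)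
    (List.replicate 51 (1000 * 100)) (by simp)
    (by intro k _ hk; rw [List.getD_eq_getElem _ _ (by simpa using hk)]; rw [List.getElem_replicate])
  simpa using this

-- the seeded first row equals B's base row
lemma pvRow0_eq (temperature : Int) (h0 : 0 ≤ temperature) (h50 : temperature ≤ 50) (lo hi drift a b : Int) (onboard : List Int) :
    PySem.List.pySetD (List.replicate 51 (1000 * 100)) temperature 0
      = pvB_row (1000 * 100) lo hi temperature drift a b onboard 0 := by
  unfold pvB_row
  rw [PySem.List.pySetD_of_nonneg _ _ h0]
  apply List.ext_getElem
  · simp [PySem.List.length_pyRange_one]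
  · intro i h1 h2
    simp only [List.getElem_set, List.getElem_map, PySem.List.getElem_pyRange_one,
      List.getElem_replicate]
    split_ifs <;> omega

-- outer loop invariant
lemma pvOuter (t1 t2 temperature temp_diff a b : Int) (onboard : List Int)
    (h0 : 0 ≤ temperature) (h50 : temperature ≤ 50) (hne : onboard ≠ [])
    (m : Nat) (hm : m < onboard.length) :
    (PySem.List.pyRange 1 ((m : Int) + 1) 1).foldl
        (fun dp i => pvA_inner t1 t2 temperature temp_diff a b onboard i dp)
        (PySem.List.pySetD (List.replicate onboard.length (List.replicate 51 (1000 * 100))) 0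
          (PySem.List.pySetD (PySem.List.pyGetD (List.replicate onboard.length (List.replicate 51 (1000 * 100))) 0 []) temperature 0))
      = (List.range (m + 1)).map (fun k => pvB_row (1000 * 100) t1 t2 temperature temp_diff a b onboard k)
          ++ List.replicate (onboard.length - 1 - m) (List.replicate 51 (1000 * 100)) := by
  have hn1 : 1 ≤ onboard.length := List.length_pos_iff.mpr hne
  induction m with
  | zero =>
    rw [show ((0 : Nat) : Int) + 1 = 1 by norm_num, PySem.List.pyRange_one_eq_nil le_rfl]
    simp only [List.foldl_nil]
    obtain ⟨x, xs, hx⟩ : ∃ x xs, onboard = x :: xs := by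
      cases onboard with
      | nil => exact absurd rfl hne
      | cons x xs => exact ⟨x, xs, rfl⟩
    subst hx
    simp only [List.length_cons]
    rw [show List.replicate (xs.length + 1) (List.replicate 51 (1000 * 100 : Int))
        = List.replicate 51 (1000 * 100 : Int)
            :: List.replicate xs.length (List.replicate 51 (1000 * 100)) from List.replicate_succ]
    rw [PySem.List.pyGetD_zero_cons, PySem.List.pySetD_of_nonneg _ _ le_rfl]
    rw [show ((0 : Int)).toNat = 0 from rfl, List.set_cons_zero]
    rw [pvRow0_eq temperature h0 h50 t1 t2 temp_diff a b (x :: xs)]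
    simp [List.range_succ]
  | succ m ih =>
    have hm' : m < onboard.length := by omega
    have ihe := ih hm'
    have hcast1 : ((m + 1 : Nat) : Int) + 1 = ((m : Int) + 1) + 1 := by push_cast; ring
    rw [hcast1, PySem.List.pyRange_one_succ_right (by omega), List.foldl_append,
      List.foldl_cons, List.foldl_nil, ihe]
    set T := (List.range (m + 1)).map
        (fun k => pvB_row (1000 * 100) t1 t2 temperature temp_diff a b onboard k)
        ++ List.replicate (onboard.length - 1 - m) (List.replicate 51 (1000 * 100)) with hT
    have hPlen : ((List.range (m + 1)).map
        (fun k => pvB_row (1000 * 100) t1 t2 temperature temp_diff a b onboard k)).length = m + 1 := by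
      simp
    have hTlen : T.length = onboard.length := by
      rw [hT]; simp; omega
    have hcast2 : ((m : Int) + 1) = ((m + 1 : Nat) : Int) := by push_cast; ring
    rw [hcast2, pvA_inner_eq_row t1 t2 temperature temp_diff a b onboard (m + 1) T
      (by omega) (by omega)]
    have hrep : onboard.length - 1 - m = (onboard.length - 2 - m) + 1 := by omega
    have hgetT : PySem.List.pyGetD T ((m + 1 : Nat) : Int) [] = List.replicate 51 (1000 * 100) := by
      rw [PySem.List.pyGetD_natCast, List.getD_eq_getElem _ _ (by omega)]
      rw [List.getElem_append_right (by omega)]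
      simp
    have hprevT : PySem.List.pyGetD T (((m + 1 : Nat) : Int) - 1) []
        = pvB_row (1000 * 100) t1 t2 temperature temp_diff a b onboard m := by
      rw [show (((m + 1 : Nat) : Int) - 1) = ((m : Nat) : Int) by push_cast; ring]
      rw [PySem.List.pyGetD_natCast, List.getD_eq_getElem _ _ (by omega)]
      rw [List.getElem_append_left (by omega)]
      simp
    rw [hgetT, hprevT, pvRowFold_eq_map]
    have hcell : (PySem.List.pyRange 0 51 1).map
        (pvCellA t1 t2 temperature temp_diff a b (PySem.List.pyGetD onboard ((m + 1 : Nat) : Int) 0)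
          (pvB_row (1000 * 100) t1 t2 temperature temp_diff a b onboard m))
        = pvB_row (1000 * 100) t1 t2 temperature temp_diff a b onboard (m + 1) := by
      rw [show pvB_row (1000 * 100) t1 t2 temperature temp_diff a b onboard (m + 1)
          = (PySem.List.pyRange 0 51 1).map
              (pvB_cell (1000 * 100) t1 t2 temperature temp_diff a b
                (PySem.List.pyGetD onboard ((m : Int) + 1) 0)
                (pvB_row (1000 * 100) t1 t2 temperature temp_diff a b onboard m)) from rfl]
      rw [show ((m : Int) + 1) = ((m + 1 : Nat) : Int) by push_cast; ring]
      exact List.map_congr_left (fun j _ => pvCellA_eq_pvB_cell _ _ _ _ _ _ _ _ j)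
    rw [hcell]
    rw [PySem.List.pySetD_of_nonneg _ _ (by omega)]
    rw [show ((m + 1 : Nat) : Int).toNat = m + 1 from by omega]
    rw [List.set_append_right _ _ (by omega)]
    rw [show m + 1 - ((List.range (m + 1)).map
        (fun k => pvB_row (1000 * 100) t1 t2 temperature temp_diff a b onboard k)).length = 0 from by
      rw [hPlen]; omega]
    rw [hrep, List.replicate_succ, List.set_cons_zero]
    rw [show m + 1 + 1 = (m + 1) + 1 from rfl, List.range_succ, List.map_append]
    simp only [List.map_cons, List.map_nil, List.append_assoc, List.cons_append, List.nil_append]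
    rw [show onboard.length - 1 - (m + 1) = onboard.length - 2 - m from by omega]
    simp [List.range_succ]

-- ===== VERDICT (by name: the statement is the Claim_ definition above) =====
theorem solution_spec : Claim_equal_solution := by
  unfold Claim_equal_solution Spec_solution
  intro temperature t1 t2 a b onboard _ hpre
  obtain ⟨hne, h0, h50⟩ := hpre
  have hn1 : 1 ≤ onboard.length := List.length_pos_iff.mpr hne
  simp only [solution, solution_alt]
  rw [show ((onboard.length : Int)) = ((onboard.length - 1 : Nat) : Int) + 1 from by omega]
  rw [pvOuter (t1 + 10) (t2 + 10) (temperature + 10)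
    (if temperature + 10 > t2 + 10 then -1 else 1) a b onboard h0 h50 hne
    (onboard.length - 1) (by omega)]
  rw [show onboard.length - 1 - (onboard.length - 1) = 0 from by omega]
  rw [List.replicate_zero, List.append_nil]
  rw [show (((onboard.length - 1 : Nat) : Int) + 1 - 1) = ((onboard.length - 1 : Nat) : Int) from by ring]
  rw [PySem.List.pyGetD_natCast, List.getD_eq_getElem _ _ (by simp only [List.length_map, List.length_range]; omega)]
  rw [List.getElem_map, List.getElem_range]
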